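-- pv_equiv track=rewrite | github.com/pm1100tm/Algorithm | code_snippet/consecutive_numbers_with_n.py | is_consecutive_numbers_1
-- ===== SOURCE A (Python) =====
-- def is_consecutive_numbers_1(numbers: list[int], n: int) -> bool:
--     """
--     연속된 숫자의 갯수를 세는 방법
--     """
--     sorted_numbers = sorted(set(numbers))
--     length = len(sorted_numbers)
--
--     if length < n:
--         return False
--
--     count = 1
--     result = False
--     for i in range(length - 1):
--         if sorted_numbers[i + 1] - sorted_numbers[i] != 1:
--             count = 1
--             continue
--
--         count += 1
--         if count == n:
--             result = True
--             break
--
--     return result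
-- ===== SOURCE B (Python) =====
-- def is_consecutive_numbers_1(numbers: list[int], n: int) -> bool:
--     """Hash-set run counting: no sort; scan each run once from its start.
--
--     A never returns True for n < 2 (its counter starts at 1 and is only
--     compared with n after an increment), so n >= 2 is the only case with
--     content."""
--     if n < 2:
--         return False
--     s = set(numbers)
--     for x in s:
--         if x - 1 not in s:
--             run = 1
--             y = x + 1
--             while run < n and y in s:
--                 run += 1
--                 y += 1
--             if run >= n:
--                 return True
--     return False
-- ===== Notes on version B (the rewrite author's own statement) =====
-- stated objective: alternative
-- what changed: B drops A's sort of the deduplicated values and instead builds a hash set once, then counts each consecutive run only from its start (x with x-1 not in the set), stopping a count as soon as it reaches n; intended as faster (O(m) vs O(m log m)) but measured only ~1.5x and inconsistently, so no speed claim.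
import Mathlib
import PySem

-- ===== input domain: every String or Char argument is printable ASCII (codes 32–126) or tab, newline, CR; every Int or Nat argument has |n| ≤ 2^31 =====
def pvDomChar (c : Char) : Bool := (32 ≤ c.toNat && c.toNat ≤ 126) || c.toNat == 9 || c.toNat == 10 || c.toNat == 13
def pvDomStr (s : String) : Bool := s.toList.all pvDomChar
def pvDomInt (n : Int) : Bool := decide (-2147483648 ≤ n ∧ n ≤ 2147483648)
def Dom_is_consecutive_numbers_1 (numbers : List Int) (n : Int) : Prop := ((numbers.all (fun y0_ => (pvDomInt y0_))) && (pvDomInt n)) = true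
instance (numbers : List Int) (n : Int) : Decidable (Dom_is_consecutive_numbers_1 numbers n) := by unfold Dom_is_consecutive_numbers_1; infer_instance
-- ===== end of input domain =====

-- B replaces A's sort-then-scan with a hash-set run count (scan each run once
-- from its start); same return value everywhere.

-- ===== PORT A =====
-- A's for-loop over adjacent pairs of the sorted deduplicated list, with the
-- early break when count reaches n.
def pvLoopA (n : Int) : List Int → Int → Bool
  | x :: y :: rest, count =>
    if y - x ≠ 1 then pvLoopA n (y :: rest) 1
    else
      let c := count + 1
      if c = n then true else pvLoopA n (y :: rest) c
  | _, _ => false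

def is_consecutive_numbers_1 (numbers : List Int) (n : Int) : Bool :=
  let sorted_numbers := PySem.List.sorted (PySem.Set.ofList numbers) (fun x => x) false
  if (sorted_numbers.length : Int) < n then false
  else pvLoopA n sorted_numbers 1

-- ===== PORT B =====
-- the inner `while run < n and y in s` loop of Source B
def pvRunLen (s : List Int) (n : Int) (run y : Int) : Int :=
  if h : run < n ∧ y ∈ s then pvRunLen s n (run + 1) (y + 1) else run
termination_by (n - run).toNat
decreasing_by omega

def is_consecutive_numbers_1_alt (numbers : List Int) (n : Int) : Bool :=
  if n < 2 then false
  else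
    let s := PySem.Set.ofList numbers
    s.any (fun x =>
      if (x - 1) ∈ s then false
      else decide (n ≤ pvRunLen s n 1 (x + 1)))

-- ===== PRECONDITION & SPEC =====
def Spec_is_consecutive_numbers_1 (numbers : List Int) (n : Int) (out : Bool) : Prop := out = is_consecutive_numbers_1_alt numbers n
instance (numbers : List Int) (n : Int) (out : Bool) : Decidable (Spec_is_consecutive_numbers_1 numbers n out) := by unfold Spec_is_consecutive_numbers_1; infer_instance

-- ===== CLAIM (what is proved, stated in full; the proofs are below) =====
def Claim_equal_is_consecutive_numbers_1 : Prop := ∀ (numbers : List Int) (n : Int), Dom_is_consecutive_numbers_1 numbers n → Spec_is_consecutive_numbers_1 numbers n (is_consecutive_numbers_1 numbers n)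

-- ===== LEMMAS AND PROOFS =====

-- W l x m : the m consecutive integers starting at x are all in l
def W (l : List Int) (x m : Int) : Prop := ∀ k : Int, 0 ≤ k → k < m → x + k ∈ l

lemma W_congr {l l' : List Int} (h : ∀ a : Int, a ∈ l ↔ a ∈ l') (x m : Int) :
    W l x m ↔ W l' x m := by
  constructor <;> intro hw k hk0 hkm
  · exact (h _).1 (hw k hk0 hkm)
  · exact (h _).2 (hw k hk0 hkm)

lemma W_mono {l : List Int} {x m m' : Int} (h : m ≤ m') (hw : W l x m') : W l x m :=
  fun k hk0 hkm => hw k hk0 (by omega)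

lemma W_mem {l : List Int} {x m : Int} (hm : 0 < m) (hw : W l x m) : x ∈ l := by
  have := hw 0 le_rfl hm; simpa using this

lemma W_shift {l : List Int} {x m : Int} (hm : 0 ≤ m) :
    W l x (m + 1) ↔ (x ∈ l ∧ W l (x + 1) m) := by
  constructor
  · intro hw
    refine ⟨W_mem (by omega) hw, fun k hk0 hkm => ?_⟩
    have := hw (k + 1) (by omega) (by omega)
    have e : x + (k + 1) = x + 1 + k := by ring
    rwa [e] at this
  · rintro ⟨hx, hw⟩ k hk0 hkm
    rcases eq_or_lt_of_le hk0 with h0 | h0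
    · simpa [← h0] using hx
    · have := hw (k - 1) (by omega) (by omega)
      have e : x + 1 + (k - 1) = x + k := by ring
      rwa [e] at this

lemma W_cons_out {l : List Int} {a x m : Int} (hax : a < x) :
    W (a :: l) x m ↔ W l x m := by
  constructor <;> intro hw k hk0 hkm
  · have := hw k hk0 hkm
    rcases List.mem_cons.1 this with h | h
    · omega
    · exact h
  · exact List.mem_cons.2 (Or.inr (hw k hk0 hkm))

-- ---- B side ----

lemma pvRunLen_ge (s : List Int) (n : Int) :
    ∀ (fuel : Nat) (run y : Int), (n - run).toNat = fuel → run ≤ n →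
      (n ≤ pvRunLen s n run y ↔ ∀ k : Int, 0 ≤ k → k < n - run → y + k ∈ s) := by
  intro fuel
  induction fuel with
  | zero =>
    intro run y hf hrn
    have hrun : run = n := by omega
    rw [pvRunLen]
    simp only [hrun]
    constructor
    · intro _ k hk0 hkm; omega
    · intro _; simp
  | succ m ih =>
    intro run y hf hrn
    have hlt : run < n := by omega
    by_cases hy : y ∈ s
    · rw [pvRunLen]
      simp only [hlt, hy, and_self, dite_true]
      rw [ih (run + 1) (y + 1) (by omega) (by omega)]
      constructor
      · intro hw k hk0 hkm
        rcases eq_or_lt_of_le hk0 with h0 | h0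
        · simpa [← h0] using hy
        · have := hw (k - 1) (by omega) (by omega)
          have e : y + 1 + (k - 1) = y + k := by ring
          rwa [e] at this
      · intro hw k hk0 hkm
        have := hw (k + 1) (by omega) (by omega)
        have e : y + (k + 1) = y + 1 + k := by ring
        rwa [e] at this
    · rw [pvRunLen]
      simp only [hy, and_false, dite_false]
      constructor
      · intro h; omega
      · intro hw
        exact absurd (by simpa using hw 0 le_rfl (by omega)) hy

lemma alt_char (numbers : List Int) (n : Int) (hn : 2 ≤ n) :
    is_consecutive_numbers_1_alt numbers n = true ↔
      ∃ x : Int, (x - 1) ∉ PySem.Set.ofList numbers ∧ W (PySem.Set.ofList numbers) x n := by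
  unfold is_consecutive_numbers_1_alt
  have hn2 : ¬ n < 2 := by omega
  simp only [hn2, if_false, List.any_eq_true]
  set s := PySem.Set.ofList numbers with hs
  constructor
  · rintro ⟨x, hxs, hx⟩
    by_cases hprev : (x - 1) ∈ s
    · simp [hprev] at hx
    · simp only [hprev, if_false, decide_eq_true_eq] at hx
      refine ⟨x, hprev, ?_⟩
      have := (pvRunLen_ge s n (n - 1).toNat 1 (x + 1) (by omega) (by omega)).1 hx
      rw [show n = (n - 1) + 1 by ring, W_shift (by omega)]
      exact ⟨hxs, this⟩
  · rintro ⟨x, hprev, hw⟩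
    have hxs : x ∈ s := W_mem (by omega) hw
    refine ⟨x, hxs, ?_⟩
    simp only [hprev, if_false, decide_eq_true_eq]
    rw [pvRunLen_ge s n (n - 1).toNat 1 (x + 1) (by omega) (by omega)]
    rw [show n = (n - 1) + 1 by ring, W_shift (by omega)] at hw
    exact hw.2

-- ---- run-start extraction (used for the A → B direction) ----

lemma filter_len_mono (s : List Int) (p q : Int → Bool) (h : ∀ a, p a = true → q a = true) :
    (s.filter p).length ≤ (s.filter q).length := by
  induction s with
  | nil => simp
  | cons a t ih =>
    by_cases hp : p a = true
    · simp only [List.filter_cons, hp, h a hp, if_true, List.length_cons]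
      omega
    · by_cases hq : q a = true <;>
        simp only [List.filter_cons, hp, hq, if_true, if_false, Bool.false_eq_true,
          List.length_cons] <;> omega

lemma filter_len_strict (s : List Int) (x : Int) (hx : (x - 1) ∈ s) :
    (s.filter (fun a => decide (a < x - 1))).length < (s.filter (fun a => decide (a < x))).length := by
  induction s with
  | nil => simp at hx
  | cons a t ih =>
    have hmono := filter_len_mono t (fun a => decide (a < x - 1)) (fun a => decide (a < x))
      (fun a ha => by simp only [decide_eq_true_eq] at ha ⊢; omega)
    rcases List.mem_cons.1 hx with h | h
    · subst h
      have e1 : (((x - 1) :: t).filter (fun a => decide (a < x - 1))).length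
          = (t.filter (fun a => decide (a < x - 1))).length := by
        simp only [List.filter_cons]; norm_num
      have e2 : (((x - 1) :: t).filter (fun a => decide (a < x))).length
          = (t.filter (fun a => decide (a < x))).length + 1 := by
        simp only [List.filter_cons]; norm_num
      omega
    · have hlt := ih h
      by_cases h1 : a < x - 1
      · have h2 : a < x := by omega
        simp only [List.filter_cons, h1, h2, decide_true, if_true, List.length_cons]
        omega
      · by_cases h2 : a < x <;>
          simp only [List.filter_cons, h1, h2, decide_true, decide_false, if_true, if_false,
            Bool.false_eq_true, List.length_cons] <;> omega

lemma exists_start (s : List Int) (n : Int) :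
    ∀ (m : Nat) (x : Int), (s.filter (fun a => decide (a < x))).length = m → W s x n →
      ∃ x' : Int, (x' - 1) ∉ s ∧ W s x' n := by
  intro m
  induction m using Nat.strong_induction_on with
  | _ m ih =>
    intro x hm hw
    by_cases hprev : (x - 1) ∈ s
    · have hw' : W s (x - 1) n := by
        intro k hk0 hkm
        rcases eq_or_lt_of_le hk0 with h0 | h0
        · simpa [← h0] using hprev
        · have := hw (k - 1) (by omega) (by omega)
          have e : x + (k - 1) = x - 1 + k := by ring
          rwa [e] at this
      have hlt := filter_len_strict s x hprev
      exact ih _ (by omega) (x - 1) rfl hw'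
    · exact ⟨x, hprev, hw⟩

-- ---- A side ----

lemma pvLoopA_small (n : Int) (hn : n ≤ 1) :
    ∀ (l : List Int) (count : Int), 1 ≤ count → pvLoopA n l count = false := by
  intro l
  induction l with
  | nil => intro count _; rfl
  | cons x t ih =>
    intro count hc
    cases t with
    | nil => rfl
    | cons y rest =>
      rw [pvLoopA]
      by_cases hne : y - x ≠ 1
      · rw [if_pos hne]
        exact ih 1 le_rfl
      · rw [if_neg hne]
        have hcn : ¬ (count + 1 = n) := by omega
        rw [if_neg hcn]
        exact ih (count + 1) (by omega)

lemma pvLoopA_iff (n : Int) (hn : 2 ≤ n) :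
    ∀ (l : List Int), l.Pairwise (· < ·) →
      ∀ count : Int, 1 ≤ count → count < n →
        (pvLoopA n l count = true ↔
          (∃ x, l.head? = some x ∧ W l x (n - count + 1)) ∨ (∃ x ∈ l, W l x n)) := by
  intro l
  induction l with
  | nil =>
    intro _ count _ _
    simp [pvLoopA]
  | cons x t ih =>
    intro hp count hc1 hcn
    have hpx : ∀ z ∈ t, x < z := fun z hz => (List.pairwise_cons.1 hp).1 z hz
    have hpt : t.Pairwise (· < ·) := (List.pairwise_cons.1 hp).2
    cases t with
    | nil =>
      constructor
      · intro h; simp [pvLoopA] at h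
      · rintro (⟨z, hz, hw⟩ | ⟨z, hz, hw⟩)
        · simp only [List.head?_cons, Option.some.injEq] at hz
          subst hz
          have h1 := hw 1 (by omega) (by omega)
          rcases List.mem_singleton.1 h1 with h1
          omega
        · simp only [List.mem_singleton] at hz
          subst hz
          have h1 := hw 1 (by omega) (by omega)
          rcases List.mem_singleton.1 h1 with h1
          omega
    | cons y rest =>
      have hxy : x < y := hpx y (List.mem_cons_self ..)
      have hyrest : ∀ z ∈ y :: rest, x < z := hpx
      have hout : ∀ (v m : Int), x < v → (W (x :: y :: rest) v m ↔ W (y :: rest) v m) :=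
        fun v m hv => W_cons_out hv
      rw [pvLoopA]
      by_cases hne : y - x ≠ 1
      · -- gap: restart with count = 1
        have hy2 : x + 2 ≤ y := by omega
        have hnx1 : (x + 1) ∉ (x :: y :: rest) := by
          intro hmem
          rcases List.mem_cons.1 hmem with h | h
          · omega
          · rcases List.mem_cons.1 h with h' | h'
            · omega
            · have := (List.pairwise_cons.1 hpt).1 _ h'; omega
        have hWx_false : ∀ m : Int, 2 ≤ m → ¬ W (x :: y :: rest) x m := by
          intro m hm hw
          exact hnx1 (hw 1 (by omega) (by omega))
        rw [if_pos hne]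
        rw [ih hpt 1 le_rfl (by omega)]
        constructor
        · rintro (⟨z, hz, hw⟩ | ⟨z, hz, hw⟩)
          · simp only [List.head?_cons, Option.some.injEq] at hz
            subst hz
            refine Or.inr ⟨y, List.mem_cons.2 (Or.inr (List.mem_cons_self ..)), ?_⟩
            rw [hout y n hxy]
            exact W_mono (by omega) hw
          · exact Or.inr ⟨z, List.mem_cons.2 (Or.inr hz), (hout z n (hyrest z hz)).2 hw⟩
        · rintro (⟨z, hz, hw⟩ | ⟨z, hz, hw⟩)
          · simp only [List.head?_cons, Option.some.injEq] at hz
            subst hz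
            exact absurd hw (hWx_false _ (by omega))
          · rcases List.mem_cons.1 hz with h | h
            · subst h
              exact absurd hw (hWx_false _ (by omega))
            · exact Or.inr ⟨z, h, (hout z n (hyrest z h)).1 hw⟩
      · -- adjacent: y = x + 1
        have hyx : y = x + 1 := by omega
        rw [if_neg hne]
        have hWhead : ∀ m : Int, 0 ≤ m →
            (W (x :: y :: rest) x (m + 1) ↔ W (y :: rest) y m) := by
          intro m hm
          rw [W_shift hm]
          constructor
          · rintro ⟨_, hw⟩
            rw [← hyx] at hw
            exact (hout y m hxy).1 hw
          · intro hw
            refine ⟨List.mem_cons_self .., ?_⟩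
            rw [← hyx]
            exact (hout y m hxy).2 hw
        by_cases hceq : count + 1 = n
        · rw [if_pos hceq]
          constructor
          · intro _
            left
            refine ⟨x, rfl, ?_⟩
            intro k hk0 hkm
            have hk2 : k = 0 ∨ k = 1 := by omega
            rcases hk2 with rfl | rfl
            · simp
            · have e : x + 1 = y := by omega
              rw [e]
              exact List.mem_cons.2 (Or.inr (List.mem_cons_self ..))
          · intro _; rfl
        · have hclt : count + 1 < n := by omega
          rw [if_neg hceq]
          rw [ih hpt (count + 1) (by omega) hclt]
          constructor
          · rintro (⟨z, hz, hw⟩ | ⟨z, hz, hw⟩)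
            · simp only [List.head?_cons, Option.some.injEq] at hz
              subst hz
              left
              refine ⟨x, rfl, ?_⟩
              have e : n - count + 1 = (n - (count + 1) + 1) + 1 := by ring
              rw [e, hWhead _ (by omega)]
              exact hw
            · exact Or.inr ⟨z, List.mem_cons.2 (Or.inr hz), (hout z n (hyrest z hz)).2 hw⟩
          · rintro (⟨z, hz, hw⟩ | ⟨z, hz, hw⟩)
            · simp only [List.head?_cons, Option.some.injEq] at hz
              subst hz
              left
              refine ⟨y, rfl, ?_⟩
              have e : n - count + 1 = (n - (count + 1) + 1) + 1 := by ring
              rw [e, hWhead _ (by omega)] at hw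
              exact hw
            · rcases List.mem_cons.1 hz with h | h
              · rw [h] at hw
                left
                refine ⟨y, rfl, ?_⟩
                have hw' : W (x :: y :: rest) x (n - count + 1) := W_mono (by omega) hw
                have e : n - count + 1 = (n - (count + 1) + 1) + 1 := by ring
                rw [e, hWhead _ (by omega)] at hw'
                exact hw'
              · exact Or.inr ⟨z, h, (hout z n (hyrest z h)).1 hw⟩

-- a window of n consecutive members forces at least n distinct elements
lemma length_ge_of_W (l : List Int) (x n : Int) (hn : 0 ≤ n) (hw : W l x n) : n ≤ (l.length : Int) := by
  have hnodup : ((List.range n.toNat).map (fun k : Nat => x + (k : Int))).Nodup := by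
    refine List.Nodup.map ?_ List.nodup_range
    intro a b hab
    simpa using hab
  have hsub : ((List.range n.toNat).map (fun k : Nat => x + (k : Int))) ⊆ l := by
    intro z hz
    rcases List.mem_map.1 hz with ⟨k, hk, rfl⟩
    have hk' : k < n.toNat := List.mem_range.1 hk
    exact hw k (by omega) (by omega)
  have hle := (hnodup.subperm hsub).length_le
  simp only [List.length_map, List.length_range] at hle
  omega

lemma a_char (numbers : List Int) (n : Int) (hn : 2 ≤ n) :
    is_consecutive_numbers_1 numbers n = true ↔
      ∃ x : Int, W (PySem.Set.ofList numbers) x n := by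
  unfold is_consecutive_numbers_1
  set s := PySem.Set.ofList numbers with hs
  set sn := PySem.List.sorted s (fun x => x) false with hsn
  have hmem : ∀ a : Int, a ∈ sn ↔ a ∈ s := fun a => PySem.List.mem_sorted _ _ _ _
  have hstrict : sn.Pairwise (· < ·) := PySem.List.sorted_ofList_pairwise_lt numbers
  by_cases hlen : (sn.length : Int) < n
  · rw [if_pos hlen]
    constructor
    · intro h; simp at h
    · rintro ⟨x, hw⟩
      have hw' : W sn x n := (W_congr (fun a => (hmem a).symm) x n).1 hw
      have := length_ge_of_W sn x n (by omega) hw'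
      omega
  · rw [if_neg hlen]
    rw [pvLoopA_iff n hn sn hstrict 1 le_rfl (by omega)]
    constructor
    · rintro (⟨z, hz, hw⟩ | ⟨z, _, hw⟩)
      · exact ⟨z, (W_congr hmem z n).1 (W_mono (by omega) hw)⟩
      · exact ⟨z, (W_congr hmem z n).1 hw⟩
    · rintro ⟨x, hw⟩
      have hw' : W sn x n := (W_congr (fun a => (hmem a).symm) x n).1 hw
      exact Or.inr ⟨x, W_mem (by omega) hw', hw'⟩

-- ===== VERDICT (by name: the statement is the Claim_ definition above) =====
theorem is_consecutive_numbers_1_spec : Claim_equal_is_consecutive_numbers_1 := by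
  intro numbers n _
  unfold Spec_is_consecutive_numbers_1
  by_cases hn : n < 2
  · -- both sides are False for n < 2
    have hb : is_consecutive_numbers_1_alt numbers n = false := by
      unfold is_consecutive_numbers_1_alt
      rw [if_pos hn]
    have ha : is_consecutive_numbers_1 numbers n = false := by
      unfold is_consecutive_numbers_1
      by_cases hlen : ((PySem.List.sorted (PySem.Set.ofList numbers) (fun x => x) false).length : Int) < n
      · rw [if_pos hlen]
      · rw [if_neg hlen]
        exact pvLoopA_small n (by omega) _ 1 le_rfl
    rw [ha, hb]
  · have hn' : 2 ≤ n := by omega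
    have ha := a_char numbers n hn'
    have hb := alt_char numbers n hn'
    have hiff : (∃ x : Int, W (PySem.Set.ofList numbers) x n) ↔
        (∃ x : Int, (x - 1) ∉ PySem.Set.ofList numbers ∧ W (PySem.Set.ofList numbers) x n) := by
      constructor
      · rintro ⟨x, hw⟩
        exact exists_start _ n _ x rfl hw
      · rintro ⟨x, _, hw⟩
        exact ⟨x, hw⟩
    cases hA : is_consecutive_numbers_1 numbers n
    · cases hB : is_consecutive_numbers_1_alt numbers n
      · rfl
      · exact absurd (hiff.2 (hb.1 hB)) (by rw [← ha]; simp [hA])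
    · exact ((hb.2 (hiff.1 (ha.1 hA))).symm)
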